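-- pv_equiv track=rewrite | github.com/KostiantynRepetskyi/Simple-Chess-AI | LichessAI.py | __repetition_draw
-- ===== SOURCE A (Python) =====
-- def __repetition_draw(rep_board, boards_stack, colour):
--     rep_draw = False
--     repetitions = 0
--
--     for i in range(len(boards_stack)):
--         if boards_stack[i] == rep_board:
--             if (colour == "b" and i%2 == 0) or (colour == "w" and i%2 == 1):
--                 repetitions += 1
--
--     if repetitions == 2:
--         rep_draw = True
--
--     return rep_draw
-- ===== SOURCE B (Python) =====
-- def __repetition_draw(rep_board, boards_stack, colour):
--     if colour == "b":
--         candidates = boards_stack[0::2]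
--     elif colour == "w":
--         candidates = boards_stack[1::2]
--     else:
--         candidates = []
--     return candidates.count(rep_board) == 2
-- ===== Notes on version B (the rewrite author's own statement) =====
-- stated objective: idiomatic
-- what changed: B selects the parity-matched boards with one stride slice chosen by colour and compares its .count() to 2, instead of A's index loop testing i%2 and the colour on every element.
import Mathlib
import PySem

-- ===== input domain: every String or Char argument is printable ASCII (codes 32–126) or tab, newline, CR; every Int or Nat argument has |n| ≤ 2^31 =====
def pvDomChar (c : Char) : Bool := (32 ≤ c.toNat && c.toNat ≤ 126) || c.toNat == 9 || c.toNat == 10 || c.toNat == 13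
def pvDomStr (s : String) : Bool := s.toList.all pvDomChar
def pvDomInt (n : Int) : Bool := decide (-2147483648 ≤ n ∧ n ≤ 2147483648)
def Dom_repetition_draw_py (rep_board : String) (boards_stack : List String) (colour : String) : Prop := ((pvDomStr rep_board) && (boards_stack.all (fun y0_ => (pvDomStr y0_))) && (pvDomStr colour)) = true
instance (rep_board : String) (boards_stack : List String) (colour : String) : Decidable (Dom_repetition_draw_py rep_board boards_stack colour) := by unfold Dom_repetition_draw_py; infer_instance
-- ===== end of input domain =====

-- B replaces A's index loop (testing i%2 and the colour per element) by one parity slice chosen by the colour, counted once: more idiomatic, same O(n) cost.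


-- ===== PORT A =====
def repetition_draw_py (rep_board : String) (boards_stack : List String) (colour : String) : Bool :=
  let rep_draw := false
  let repetitions : Int := 0
  let repetitions := (PySem.List.pyRange 0 (boards_stack.length : Int) 1).foldl
    (fun reps i =>
      if PySem.List.pyGetD boards_stack i "" == rep_board then
        if (colour == "b" && PySem.Int.mod i 2 == 0) || (colour == "w" && PySem.Int.mod i 2 == 1) then
          reps + 1
        else reps
      else reps) repetitions
  let rep_draw := if repetitions == 2 then true else rep_draw
  rep_draw

-- ===== PORT B =====
def repetition_draw_py_alt (rep_board : String) (boards_stack : List String) (colour : String) : Bool :=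
  let candidates :=
    if colour == "b" then (PySem.List.slice? boards_stack (some 0) none 2).getD []
    else if colour == "w" then (PySem.List.slice? boards_stack (some 1) none 2).getD []
    else []
  PySem.List.count candidates rep_board == 2

-- ===== PRECONDITION & SPEC =====
def Spec_repetition_draw_py (rep_board : String) (boards_stack : List String) (colour : String) (out : Bool) : Prop := out = repetition_draw_py_alt rep_board boards_stack colour
instance (rep_board : String) (boards_stack : List String) (colour : String) (out : Bool) : Decidable (Spec_repetition_draw_py rep_board boards_stack colour out) := by unfold Spec_repetition_draw_py; infer_instance

-- ===== CLAIM (what is proved, stated in full; the proofs are below) =====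
def Claim_equal_repetition_draw_py : Prop := ∀ (rep_board : String) (boards_stack : List String) (colour : String), Dom_repetition_draw_py rep_board boards_stack colour → Spec_repetition_draw_py rep_board boards_stack colour (repetition_draw_py rep_board boards_stack colour)

-- ===== LEMMAS AND PROOFS =====

/-- Elements at even indices (what Python's `xs[0::2]` selects); proof-side helper. -/
def everyOther {α : Type} : List α → List α
  | [] => []
  | [a] => [a]
  | a :: _ :: t => a :: everyOther t

theorem stride2 {α : Type} (xs : List α) :
    List.filterMap (fun k => xs[2 * k]?) (List.range ((xs.length + 1) / 2)) = everyOther xs := by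
  induction xs using everyOther.induct with
  | case1 => simp [everyOther]
  | case2 a => simp [everyOther, List.range_succ]
  | case3 a b t ih =>
    have h : ((a :: b :: t).length + 1) / 2 = (t.length + 1) / 2 + 1 := by
      simp; omega
    rw [h, List.range_succ_eq_map, List.filterMap_cons, List.filterMap_map]
    have hf : ((fun k => (a :: b :: t)[2 * k]?) ∘ Nat.succ) = (fun k => t[2 * k]?) := by
      funext k
      show (a :: b :: t)[2 * (k + 1)]? = t[2 * k]?
      have h2 : 2 * (k + 1) = 2 * k + 1 + 1 := by omega
      simp [h2]
    rw [hf, ih]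
    simp [everyOther]

theorem slice0 {α : Type} (xs : List α) :
    PySem.List.slice? xs (some 0) none 2 = some (everyOther xs) := by
  simp [PySem.List.slice?, PySem.List.sliceIndices]
  have hc : (if 0 < xs.length then (((xs.length : Int) + 2 - 1) / 2).toNat else 0) = (xs.length + 1) / 2 := by
    split <;> omega
  rw [hc]
  have hf : (fun x : Nat => xs[((2 : Int) * ↑x).toNat]?) = (fun k => xs[2 * k]?) := by
    funext k
    have h : ((2 : Int) * ↑k).toNat = 2 * k := by omega
    rw [h]
  rw [hf, stride2]

theorem slice1 {α : Type} (xs : List α) :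
    PySem.List.slice? xs (some 1) none 2 = some (everyOther xs.tail) := by
  cases xs with
  | nil => rfl
  | cons a t =>
    simp [PySem.List.slice?, PySem.List.sliceIndices]
    have hc : (if 0 < t.length then (((t.length : Int) + 2 - 1) / 2).toNat else 0) = (t.length + 1) / 2 := by
      split <;> omega
    rw [hc]
    have hf : (fun x : Nat => (a :: t)[((1 : Int) + 2 * ↑x).toNat]?) = (fun k => t[2 * k]?) := by
      funext k
      have h : ((1 : Int) + 2 * ↑k).toNat = 2 * k + 1 := by omega
      rw [h]
      simp
    rw [hf, stride2]

theorem countP_even (rep : String) (xs : List String) :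
    (List.range xs.length).countP
      (fun k => (xs.getD k "" == rep) && (k % 2 == 0)) = (everyOther xs).count rep := by
  induction xs using everyOther.induct with
  | case1 => simp [everyOther]
  | case2 a => simp [everyOther, List.range_succ, List.count_cons]
  | case3 a b t ih =>
    have h : (a :: b :: t).length = t.length + 1 + 1 := by simp
    rw [h, List.range_succ_eq_map, List.range_succ_eq_map]
    simp only [List.map_cons, List.countP_cons, List.countP_map, List.map_map]
    have hf : ((fun k => ((a :: b :: t).getD k "" == rep) && (k % 2 == 0)) ∘ Nat.succ ∘ Nat.succ)
        = (fun k => (t.getD k "" == rep) && (k % 2 == 0)) := by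
      funext k
      simp only [Function.comp_apply, Nat.succ_eq_add_one]
      have h2 : (k + 1 + 1) % 2 = k % 2 := by omega
      simp [h2]
    rw [hf, ih]
    simp [everyOther, List.count_cons]

theorem countP_odd (rep : String) (xs : List String) :
    (List.range xs.length).countP
      (fun k => (xs.getD k "" == rep) && (k % 2 == 1)) = (everyOther xs.tail).count rep := by
  induction xs using everyOther.induct with
  | case1 => simp [everyOther]
  | case2 a => simp [everyOther, List.range_succ]
  | case3 a b t ih =>
    have h : (a :: b :: t).length = t.length + 1 + 1 := by simp
    rw [h, List.range_succ_eq_map, List.range_succ_eq_map]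
    simp only [List.map_cons, List.countP_cons, List.countP_map, List.map_map]
    have hf : ((fun k => ((a :: b :: t).getD k "" == rep) && (k % 2 == 1)) ∘ Nat.succ ∘ Nat.succ)
        = (fun k => (t.getD k "" == rep) && (k % 2 == 1)) := by
      funext k
      simp only [Function.comp_apply, Nat.succ_eq_add_one]
      have h2 : (k + 1 + 1) % 2 = k % 2 := by omega
      simp [h2]
    rw [hf, ih]
    cases t with
    | nil => simp [everyOther, List.count_cons]
    | cons c t' =>
      simp [everyOther, List.count_cons]

theorem modcast (k : Nat) : PySem.Int.mod (k : Int) 2 = ((k % 2 : Nat) : Int) := by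
  exact_mod_cast PySem.Int.mod_natCast k 2

theorem intbeq (c : Nat) : ((0 : Int) + (c : Int) == 2) = (c == 2) := by
  by_cases h : c = 2
  · simp [h]
  · simp [h]
    omega

-- ===== VERDICT (by name: the statement is the Claim_ definition above) =====
theorem repetition_draw_py_spec : Claim_equal_repetition_draw_py := by
  intro rep xs colour _
  unfold Spec_repetition_draw_py
  by_cases hb : colour = "b"
  · subst hb
    simp only [repetition_draw_py, repetition_draw_py_alt, PySem.List.pyRange_zero_natCast,
      List.foldl_map, slice0, Option.getD_some, PySem.List.count_eq, PySem.List.pyGetD_natCast,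
      modcast]
    rw [show (fun (reps : Int) (k : Nat) =>
          if (xs.getD k "" == rep) = true then
            if (("b" == "b" && ((k % 2 : Nat) : Int) == 0) || ("b" == "w" && ((k % 2 : Nat) : Int) == 1)) = true then reps + 1
            else reps
          else reps)
        = (fun (reps : Int) (k : Nat) =>
            if ((xs.getD k "" == rep) && (k % 2 == 0)) = true then reps + 1 else reps) from by
      funext reps k
      have h2 : k % 2 = 0 ∨ k % 2 = 1 := by omega
      rcases h2 with h | h <;> simp [h]]
    rw [PySem.List.foldl_if_add_one, countP_even]
    rw [intbeq]
    cases h : (List.count rep (everyOther xs) == 2) <;> simp [h]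
  · by_cases hw : colour = "w"
    · subst hw
      simp only [repetition_draw_py, repetition_draw_py_alt, PySem.List.pyRange_zero_natCast,
        List.foldl_map, slice1, Option.getD_some, PySem.List.count_eq, PySem.List.pyGetD_natCast,
        modcast]
      rw [show (fun (reps : Int) (k : Nat) =>
            if (xs.getD k "" == rep) = true then
              if (("w" == "b" && ((k % 2 : Nat) : Int) == 0) || ("w" == "w" && ((k % 2 : Nat) : Int) == 1)) = true then reps + 1
              else reps
            else reps)
          = (fun (reps : Int) (k : Nat) =>
              if ((xs.getD k "" == rep) && (k % 2 == 1)) = true then reps + 1 else reps) from by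
        funext reps k
        have h2 : k % 2 = 0 ∨ k % 2 = 1 := by omega
        rcases h2 with h | h <;> simp [h]]
      rw [PySem.List.foldl_if_add_one, countP_odd]
      rw [intbeq]
      cases h : (List.count rep (everyOther xs.tail) == 2) <;> simp [h]
    · simp only [repetition_draw_py, repetition_draw_py_alt]
      have hb' : (colour == "b") = false := by simp [hb]
      have hw' : (colour == "w") = false := by simp [hw]
      simp [hb', hw']
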